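-- pv_equiv track=rewrite | github.com/fdamhaut/AoC | 8AB.py | compute
-- ===== SOURCE A (Python) =====
-- def compute(line):
--     max = -1
--     for i in line:
--         if i > max:
--             yield 1
--             max = i
--         else:
--             yield 0
-- ===== SOURCE B (Python) =====
-- def compute(line):
--     # Stream the prefix running maximum (starting from -1) and yield 1 exactly
--     # when it strictly increases between consecutive outputs; raw elements are
--     # never compared with each other directly.
--     def running_max(xs):
--         m = -1
--         yield m
--         for i in xs:
--             m = i if i > m else m
--             yield m
--     it = running_max(line)
--     prev = next(it)
--     for cur in it:
--         yield 1 if cur > prev else 0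
--         prev = cur
-- ===== Notes on version B (the rewrite author's own statement) =====
-- stated objective: alternative
-- what changed: B never compares raw elements: it streams the prefix running maximum (seeded with -1) and emits 1 exactly where that stream strictly increases between consecutive values, instead of A's single loop that compares each element against a mutable max and updates it.
import Mathlib
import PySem

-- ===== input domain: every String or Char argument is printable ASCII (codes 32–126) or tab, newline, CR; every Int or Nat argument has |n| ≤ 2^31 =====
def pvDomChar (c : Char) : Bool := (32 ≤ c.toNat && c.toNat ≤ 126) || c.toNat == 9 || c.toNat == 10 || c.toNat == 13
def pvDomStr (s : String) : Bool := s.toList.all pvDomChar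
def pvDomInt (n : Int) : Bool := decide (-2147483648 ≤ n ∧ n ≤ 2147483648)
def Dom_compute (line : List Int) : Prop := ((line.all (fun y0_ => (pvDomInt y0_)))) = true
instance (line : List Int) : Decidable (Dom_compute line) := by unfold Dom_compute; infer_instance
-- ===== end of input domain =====

-- B streams the prefix running maximum and marks its strict increases; no raw-element comparisons.
-- ===== PORT A =====
def computeGo : List Int → Int → List Int
  | [], _ => []
  | i :: t, m => if i > m then 1 :: computeGo t i else 0 :: computeGo t m

def compute (line : List Int) : List Int := computeGo line (-1)

-- ===== PORT B =====
-- running_max generator: yields m after each element (the initial -1 is consumed by next())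
def runMax : List Int → Int → List Int
  | [], _ => []
  | i :: t, m => let m' := if i > m then i else m; m' :: runMax t m'

def diffMarks : Int → List Int → List Int
  | _, [] => []
  | prev, c :: t => (if c > prev then 1 else 0) :: diffMarks c t

def compute_alt (line : List Int) : List Int := diffMarks (-1) (runMax line (-1))

-- ===== PRECONDITION & SPEC =====
def Spec_compute (line : List Int) (out : List Int) : Prop := out = compute_alt line
instance (line : List Int) (out : List Int) : Decidable (Spec_compute line out) := by unfold Spec_compute; infer_instance

-- ===== CLAIM (what is proved, stated in full; the proofs are below) =====
def Claim_equal_compute : Prop := ∀ (line : List Int), Dom_compute line → Spec_compute line (compute line)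

-- ===== LEMMAS AND PROOFS =====
lemma go_eq_diff (line : List Int) : ∀ m, computeGo line m = diffMarks m (runMax line m) := by
  induction line with
  | nil => intro m; rfl
  | cons i t ih =>
    intro m
    simp only [computeGo, runMax, diffMarks]
    by_cases h : i > m
    · simp [h, ih]
    · simp [h, ih]

-- ===== VERDICT (by name: the statement is the Claim_ definition above) =====
theorem compute_spec : Claim_equal_compute := by
  intro line _
  unfold Spec_compute compute compute_alt
  exact go_eq_diff line (-1)
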